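-- pv_equiv track=rewrite | github.com/AllanTaylor314/EverybodyCodes | 2024/06.py | gen_paths
-- ===== SOURCE A (Python) =====
-- def gen_paths(matrix, root='RR', truncate=None, visited=None):
--     if visited is None:
--         visited = set()
--     if root in visited: # Loop!
--         return
--     if root == "@":
--         yield "@"
--         return
--     for subroot in matrix[root]:
--         for path in gen_paths(matrix, subroot, truncate, visited|{root}):
--             yield root[:truncate]+path
-- ===== SOURCE B (Python) =====
-- def gen_paths(matrix, root='RR', truncate=None, visited=None):
--     dead = set() if visited is None else visited
--
--     def walk(node, avail):
--         if node in dead: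
--             return
--         if node == "@":
--             yield "@"
--             return
--         for i, (key, children) in enumerate(avail):
--             if key == node:
--                 rest = avail[:i] + avail[i + 1:]
--                 for child in children:
--                     for tail in walk(child, rest):
--                         yield node[:truncate] + tail
--                 return
--
--     yield from walk(root, [item for item in matrix.items() if item[0] not in dead])
-- ===== Notes on version B (the rewrite author's own statement) =====
-- stated objective: alternative
-- what changed: Instead of threading a growing visited set through the recursion and looking nodes up in the full dict, B walks with the list of still-available adjacency rows: expanding a node removes its row, so revisits and missing rows simply fail the row scan; each path's row list shrinks structurally.
import Mathlib
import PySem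

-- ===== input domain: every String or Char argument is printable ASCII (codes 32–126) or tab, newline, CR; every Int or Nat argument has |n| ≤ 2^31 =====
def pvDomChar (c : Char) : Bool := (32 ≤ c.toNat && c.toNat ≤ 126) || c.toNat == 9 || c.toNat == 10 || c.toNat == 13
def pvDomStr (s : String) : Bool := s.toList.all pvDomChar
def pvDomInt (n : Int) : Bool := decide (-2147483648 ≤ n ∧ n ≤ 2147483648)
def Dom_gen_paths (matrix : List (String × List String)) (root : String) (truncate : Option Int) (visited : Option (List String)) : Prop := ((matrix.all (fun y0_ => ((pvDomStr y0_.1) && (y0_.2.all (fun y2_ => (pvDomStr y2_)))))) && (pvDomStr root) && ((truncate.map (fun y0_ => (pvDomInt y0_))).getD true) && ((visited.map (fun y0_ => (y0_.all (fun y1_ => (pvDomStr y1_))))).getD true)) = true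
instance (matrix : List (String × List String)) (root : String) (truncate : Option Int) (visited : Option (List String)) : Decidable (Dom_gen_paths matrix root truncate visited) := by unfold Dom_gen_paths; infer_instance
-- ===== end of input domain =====

-- B replaces A's recursive generator over a shared visited set by a recursion that CONSUMES the
-- adjacency rows: each node expands by finding its row in the still-available rows and recursing on
-- the remaining rows, so no visited set is threaded along the path (objective: alternative; same cost).


-- root[:truncate]   (s[:None] = s)
def pvStrTake (s : String) (truncate : Option Int) : String :=
  String.ofList (PySem.Chars.slice s.toList none truncate)

-- keys of matrix (first occurrences) not yet in visited: A's termination measure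
def pvFree (matrix : List (String × List String)) (vis : PySem.Set String) : List String :=
  (PySem.List.dedup (matrix.map Prod.fst)).filter (fun k => !(PySem.Set.contains vis k))

-- lemmas A's port cites in its decreasing_by (termination); must precede the port
theorem pvCountP_lt {α : Type} (p q : α → Bool) (x : α)
    (himp : ∀ y, p y = true → q y = true) (hq : q x = true) (hp : p x = false) :
    ∀ (l : List α), x ∈ l → l.countP p < l.countP q := by
  intro l hx
  induction l with
  | nil => cases hx
  | cons a t ih =>
    rcases List.mem_cons.1 hx with rfl | hxt
    · have hle : t.countP p ≤ t.countP q := List.countP_mono_left (fun y _ hy => himp y hy)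
      simp [hp, hq]
      omega
    · have hlt := ih hxt
      by_cases ha : p a = true
      · simp [ha, himp a ha]; omega
      · simp only [List.countP_cons]
        have hb := Bool.of_not_eq_true ha
        rcases hqb : q a <;> simp [hb] <;> omega

theorem pvContainsFoldl_mem :
    ∀ (l : List (String × List String)) (d : PySem.Dict String (List String)) (k : String),
      (l.foldl (fun d p => d.insert p.1 p.2) d).contains k = true →
      d.contains k = true ∨ k ∈ l.map Prod.fst := by
  intro l
  induction l with
  | nil => intro d k h; exact Or.inl h
  | cons a t ih =>
    intro d k h
    rcases ih (d.insert a.1 a.2) k h with h' | h'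
    · rw [PySem.Dict.contains_insert] at h'
      rcases Bool.or_eq_true_iff.1 h' with hk | hk
      · exact Or.inr (by rw [List.map_cons]; exact List.mem_cons.2 (Or.inl (by simpa using hk)))
      · exact Or.inl hk
    · exact Or.inr (by rw [List.map_cons]; exact List.mem_cons.2 (Or.inr h'))

theorem pvGetOfList_mem_keys (matrix : List (String × List String)) (node : String)
    (cs : List String) (h : (PySem.Dict.ofList matrix).get? node = some cs) :
    node ∈ matrix.map Prod.fst := by
  have hc : (PySem.Dict.ofList matrix).contains node = true := by
    rw [PySem.Dict.contains_eq_isSome_get?, h]; rfl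
  rcases pvContainsFoldl_mem matrix PySem.Dict.empty node hc with h' | h'
  · rw [PySem.Dict.contains_empty] at h'; cases h'
  · exact h'

theorem pvFree_add_lt (matrix : List (String × List String)) (vis : PySem.Set String)
    (root : String) (hkey : root ∈ matrix.map Prod.fst)
    (hvis : PySem.Set.contains vis root = false) :
    (pvFree matrix (PySem.Set.add vis root)).length < (pvFree matrix vis).length := by
  unfold pvFree
  rw [← List.countP_eq_length_filter, ← List.countP_eq_length_filter]
  have himp : ∀ y, (!(PySem.Set.add vis root).contains y) = true → (!vis.contains y) = true := by
    intro y hy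
    simp only [Bool.not_eq_true'] at hy ⊢
    rcases hc : PySem.Set.contains vis y with _ | _
    · rfl
    · exfalso
      have hyv : y ∈ vis := (PySem.Set.contains_iff vis y).1 hc
      have : y ∈ PySem.Set.add vis root := (PySem.Set.mem_add vis root y).2 (Or.inl hyv)
      rw [← PySem.Set.contains_iff] at this
      rw [this] at hy
      cases hy
  have hq : (!vis.contains root) = true := by rw [hvis]; rfl
  have hp : (!(PySem.Set.add vis root).contains root) = false := by
    have hmem2 : root ∈ PySem.Set.add vis root := (PySem.Set.mem_add vis root root).2 (Or.inr rfl)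
    rw [(PySem.Set.contains_iff _ root).2 hmem2]; rfl
  exact pvCountP_lt _ _ root himp hq hp _ ((PySem.List.mem_dedup _ root).2 hkey)

-- ===== PORT A =====
-- literal port of A's recursive generator (its yielded values, collected in order);
-- where Python raises KeyError (matrix[root] missing) the port returns [] — such inputs lie outside Pre_
def pvGenA (matrix : List (String × List String)) (truncate : Option Int) (root : String) (vis : PySem.Set String) : List String :=
  if h1 : PySem.Set.contains vis root then []
  else if root == "@" then ["@"]
  else match h2 : (PySem.Dict.ofList matrix).get? root with
    | none => []
    | some cs =>
      cs.flatMap (fun subroot =>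
        (pvGenA matrix truncate subroot (PySem.Set.add vis root)).map
          (fun path => pvStrTake root truncate ++ path))
termination_by (pvFree matrix vis).length
decreasing_by
  exact pvFree_add_lt matrix vis root (pvGetOfList_mem_keys matrix root cs h2) (Bool.of_not_eq_true h1)

def gen_paths (matrix : List (String × List String)) (root : String) (truncate : Option Int) (visited : Option (List String)) : List String :=
  pvGenA matrix truncate root (visited.getD [])

-- ===== PORT B =====
-- literal port of B: walk holds the still-AVAILABLE adjacency rows; pvScan is the 'for i, (key,
-- children) in enumerate(avail)' loop, pre being the already-scanned prefix (reversed), so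
-- 'avail[:i] + avail[i+1:]' is 'pre.reverse ++ tl'.  Where Python's loop finds no row (A would
-- raise KeyError on that node) the scan just ends, yielding nothing.
mutual
def pvWalk (truncate : Option Int) (dead : PySem.Set String) (node : String)
    (avail : List (String × List String)) : List String :=
  if PySem.Set.contains dead node then []
  else if node == "@" then ["@"]
  else pvScan truncate dead node [] avail
  termination_by (avail.length, 1, 0)
  decreasing_by
    simp [Prod.lex_iff]

def pvScan (truncate : Option Int) (dead : PySem.Set String) (node : String)
    (pre todo : List (String × List String)) : List String :=
  match todo with
  | [] => []
  | (key, children) :: tl =>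
    if key == node then
      children.flatMap (fun child =>
        (pvWalk truncate dead child (pre.reverse ++ tl)).map
          (fun tail => String.ofList (PySem.Chars.slice node.toList none truncate) ++ tail))
    else pvScan truncate dead node ((key, children) :: pre) tl
  termination_by (pre.length + todo.length, 0, todo.length)
  decreasing_by
    · simp [Prod.lex_iff]
    · simp [Prod.lex_iff]
      omega
end

def gen_paths_alt (matrix : List (String × List String)) (root : String) (truncate : Option Int) (visited : Option (List String)) : List String :=
  let dead : PySem.Set String := PySem.Set.ofList (visited.getD [])
  pvWalk truncate dead root
    ((PySem.Dict.ofList matrix).items.filter (fun item => !(PySem.Set.contains dead item.1)))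

-- ===== PRECONDITION & SPEC =====
-- the set of nodes reachable from root (fixpoint iteration; edges leave only dict keys that are
-- neither '@' nor initially visited) — A raises KeyError exactly when this set reaches a node with
-- no dict entry that is neither '@' nor initially visited
def pvStep (matrix : List (String × List String)) (dead : List String) (s : List String) : List String :=
  s ++ ((PySem.Dict.ofList matrix).items.filter
    (fun p => s.contains p.1 && !(dead.contains p.1) && p.1 != "@")).flatMap Prod.snd

def pvReach (matrix : List (String × List String)) (dead : List String) (root : String) : List String :=
  (pvStep matrix dead)^[matrix.length] [root]

-- Pre_ excludes exactly the inputs on which the Python A raises KeyError: those where some node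
-- reachable from root is neither '@', nor initially visited, nor a key of the dict.
def Pre_gen_paths (matrix : List (String × List String)) (root : String) (truncate : Option Int) (visited : Option (List String)) : Prop :=
  ∀ u ∈ pvReach matrix (visited.getD []) root,
    u ∈ visited.getD [] ∨ u = "@" ∨ u ∈ (PySem.Dict.ofList matrix).items.map Prod.fst
instance (matrix : List (String × List String)) (root : String) (truncate : Option Int) (visited : Option (List String)) : Decidable (Pre_gen_paths matrix root truncate visited) := by unfold Pre_gen_paths; infer_instance

def pvWitness_gen_paths : (List (String × List String)) × String × Option Int × Option (List String) :=
  ([("RR", ["A", "@"]), ("A", ["@"])], "RR", none, none)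

def Spec_gen_paths (matrix : List (String × List String)) (root : String) (truncate : Option Int) (visited : Option (List String)) (out : List String) : Prop := out = gen_paths_alt matrix root truncate visited
instance (matrix : List (String × List String)) (root : String) (truncate : Option Int) (visited : Option (List String)) (out : List String) : Decidable (Spec_gen_paths matrix root truncate visited out) := by unfold Spec_gen_paths; infer_instance

-- ===== CLAIM (what is proved, stated in full; the proofs are below) =====
def Claim_equal_gen_paths : Prop := ∀ (matrix : List (String × List String)) (root : String) (truncate : Option Int) (visited : Option (List String)), Dom_gen_paths matrix root truncate visited → Pre_gen_paths matrix root truncate visited → Spec_gen_paths matrix root truncate visited (gen_paths matrix root truncate visited)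


-- ===== LEMMAS AND PROOFS =====

-- the scan loop finds no matching row: it falls off the end and yields nothing
theorem pvScan_none (truncate : Option Int) (dead : PySem.Set String) (node : String) :
    ∀ (todo pre : List (String × List String)), (∀ r ∈ todo, r.1 ≠ node) →
      pvScan truncate dead node pre todo = [] := by
  intro todo
  induction todo with
  | nil => intro pre _; rw [pvScan.eq_def]
  | cons r tl ih =>
    intro pre hne
    obtain ⟨key, children⟩ := r
    rw [pvScan.eq_def]
    have hk : (key == node) = false := by
      have := hne (key, children) List.mem_cons_self
      simpa using this
    simp only [hk, Bool.false_eq_true, if_false]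
    exact ih _ (fun r hr => hne r (List.mem_cons_of_mem _ hr))

-- the scan loop finds the first matching row: children expand against the remaining rows
theorem pvScan_found (truncate : Option Int) (dead : PySem.Set String) (node : String)
    (cs : List String) :
    ∀ (t1 : List (String × List String)) (pre t2 : List (String × List String)),
      (∀ r ∈ t1, r.1 ≠ node) →
      pvScan truncate dead node pre (t1 ++ (node, cs) :: t2) =
        cs.flatMap (fun child =>
          (pvWalk truncate dead child (pre.reverse ++ (t1 ++ t2))).map
            (fun tail => String.ofList (PySem.Chars.slice node.toList none truncate) ++ tail)) := by
  intro t1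
  induction t1 with
  | nil =>
    intro pre t2 _
    rw [List.nil_append, pvScan.eq_def]
    simp
  | cons r t1 ih =>
    intro pre t2 hne
    obtain ⟨key, children⟩ := r
    rw [List.cons_append, pvScan.eq_def]
    have hk : (key == node) = false := by
      have := hne (key, children) List.mem_cons_self
      simpa using this
    simp only [hk, Bool.false_eq_true, if_false]
    rw [ih ((key, children) :: pre) t2 (fun r hr => hne r (List.mem_cons_of_mem _ hr))]
    simp

theorem pvContains_add_ne (s : PySem.Set String) (a x : String) (h : x ≠ a) :
    PySem.Set.contains (PySem.Set.add s a) x = PySem.Set.contains s x := by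
  rcases hc : PySem.Set.contains s x with _ | _
  · rcases hc' : PySem.Set.contains (PySem.Set.add s a) x with _ | _
    · rfl
    · exfalso
      rcases (PySem.Set.mem_add s a x).1 ((PySem.Set.contains_iff _ x).1 hc') with hm | hm
      · rw [(PySem.Set.contains_iff s x).2 hm] at hc; cases hc
      · exact h hm
  · rw [(PySem.Set.contains_iff _ x).2 ((PySem.Set.mem_add s a x).2
      (Or.inl ((PySem.Set.contains_iff s x).1 hc)))]

-- unique-key decomposition of the dict's items around one binding
theorem pvItems_split (m : List (String × List String)) (node : String) (cs : List String)
    (hnd : (m.map Prod.fst).Nodup) (hm : (node, cs) ∈ m) :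
    ∃ m1 m2, m = m1 ++ (node, cs) :: m2 ∧ (∀ r ∈ m1, r.1 ≠ node) ∧ (∀ r ∈ m2, r.1 ≠ node) := by
  obtain ⟨m1, m2, rfl⟩ := List.append_of_mem hm
  refine ⟨m1, m2, rfl, ?_, ?_⟩
  · intro r hr hrn
    have hnd' := hnd
    rw [List.map_append, List.map_cons, List.nodup_append] at hnd'
    have hmem1 : node ∈ m1.map Prod.fst := by
      rw [← hrn]; exact List.mem_map_of_mem hr
    exact hnd'.2.2 node hmem1 node List.mem_cons_self rfl
  · intro r hr hrn
    have hnd' := hnd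
    rw [List.map_append, List.map_cons] at hnd'
    have h2 := (List.nodup_append.1 hnd').2.1
    rw [List.nodup_cons] at h2
    have hmem2 : node ∈ m2.map Prod.fst := by
      rw [← hrn]; exact List.mem_map_of_mem hr
    exact h2.1 hmem2

-- main invariant: with dead ⊆ vis and every visited-beyond-dead node a non-'@' key, B's walk over
-- the rows not yet visited equals A's recursion at the same node
theorem pvWalk_eq (matrix : List (String × List String)) (truncate : Option Int)
    (dead : PySem.Set String) :
    ∀ (n : Nat) (vis : PySem.Set String) (node : String),
      ((PySem.Dict.ofList matrix).items.filter (fun p => !(PySem.Set.contains vis p.1))).length ≤ n →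
      (∀ x ∈ (dead : List String), x ∈ (vis : List String)) →
      (∀ x ∈ (vis : List String), x ∈ (dead : List String) ∨
        (x ∈ (PySem.Dict.ofList matrix).items.map Prod.fst ∧ x ≠ "@")) →
      pvWalk truncate dead node
          ((PySem.Dict.ofList matrix).items.filter (fun p => !(PySem.Set.contains vis p.1))) =
        pvGenA matrix truncate node vis := by
  intro n
  induction n using Nat.strong_induction_on with
  | _ n ih =>
  intro vis node hlen h1 h2
  have hndk : ((PySem.Dict.ofList matrix).items.map Prod.fst).Nodup :=
    PySem.Dict.nodup_keys_ofList matrix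
  rw [pvWalk.eq_def, pvGenA.eq_def]
  by_cases hdn : PySem.Set.contains dead node = true
  · have hvn : PySem.Set.contains vis node = true :=
      (PySem.Set.contains_iff _ _).2 (h1 node ((PySem.Set.contains_iff _ _).1 hdn))
    rw [if_pos hdn, dif_pos hvn]
  · rw [if_neg hdn]
    by_cases hvn : PySem.Set.contains vis node = true
    · rw [dif_pos hvn]
      rcases h2 node ((PySem.Set.contains_iff _ _).1 hvn) with hd | ⟨_, hne⟩
      · exact absurd ((PySem.Set.contains_iff _ _).2 hd) hdn
      · rw [if_neg (by simp [hne])]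
        apply pvScan_none
        intro r hr hrn
        have hg := List.of_mem_filter hr
        rw [hrn, hvn] at hg
        cases hg
    · rw [dif_neg hvn]
      by_cases hat : node = "@"
      · subst hat
        rw [if_pos (by simp), if_pos (by simp)]
      · rw [if_neg (by simp [hat]), if_neg (by simp [hat])]
        cases hg : (PySem.Dict.ofList matrix).get? node with
        | none =>
          have hnk : node ∉ (PySem.Dict.ofList matrix).keys :=
            (PySem.Dict.get?_eq_none_iff_not_mem_keys _ _).1 hg
          apply pvScan_none
          intro r hr hrn
          exact hnk (hrn ▸ List.mem_map_of_mem (List.mem_of_mem_filter hr))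
        | some cs =>
          have hmem : (node, cs) ∈ (PySem.Dict.ofList matrix).items :=
            (PySem.Dict.get?_eq_some_iff_mem_items _ node cs hndk).1 hg
          obtain ⟨m1, m2, hsplit, hm1, hm2⟩ := pvItems_split _ node cs hndk hmem
          have hvnf : PySem.Set.contains vis node = false := Bool.of_not_eq_true hvn
          have hflt : List.filter (fun p : String × List String => !(PySem.Set.contains vis p.1))
              ((node, cs) :: m2) = (node, cs) ::
                List.filter (fun p : String × List String => !(PySem.Set.contains vis p.1)) m2 := by
            rw [List.filter_cons]
            simp only [hvnf]
            rfl
          rw [hsplit] at hlen ⊢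
          rw [List.filter_append, hflt] at hlen ⊢
          rw [pvScan_found truncate dead node cs
            (m1.filter (fun p => !(PySem.Set.contains vis p.1))) [] _
            (fun r hr => hm1 r (List.mem_of_mem_filter hr))]
          simp only [List.reverse_nil, List.nil_append]
          have hrest : m1.filter (fun p => !(PySem.Set.contains vis p.1)) ++
              m2.filter (fun p => !(PySem.Set.contains vis p.1)) =
              (PySem.Dict.ofList matrix).items.filter
                (fun p => !(PySem.Set.contains (PySem.Set.add vis node) p.1)) := by
            rw [hsplit, List.filter_append]
            have hca : PySem.Set.contains (PySem.Set.add vis node) node = true :=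
              (PySem.Set.contains_iff _ node).2 ((PySem.Set.mem_add vis node node).2 (Or.inr rfl))
            have hflt' : List.filter (fun p : String × List String =>
                !(PySem.Set.contains (PySem.Set.add vis node) p.1)) ((node, cs) :: m2) =
                List.filter (fun p : String × List String =>
                  !(PySem.Set.contains (PySem.Set.add vis node) p.1)) m2 := by
              rw [List.filter_cons]
              simp only [hca]
              rfl
            have hc1 : List.filter (fun p : String × List String =>
                !(PySem.Set.contains (PySem.Set.add vis node) p.1)) m1 =
                List.filter (fun p : String × List String => !(PySem.Set.contains vis p.1)) m1 :=
              List.filter_congr (fun r hr => by rw [pvContains_add_ne vis node r.1 (hm1 r hr)])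
            have hc2 : List.filter (fun p : String × List String =>
                !(PySem.Set.contains (PySem.Set.add vis node) p.1)) m2 =
                List.filter (fun p : String × List String => !(PySem.Set.contains vis p.1)) m2 :=
              List.filter_congr (fun r hr => by rw [pvContains_add_ne vis node r.1 (hm2 r hr)])
            rw [hflt', hc1, hc2]
          rw [hrest]
          have hlt : ((PySem.Dict.ofList matrix).items.filter
              (fun p => !(PySem.Set.contains (PySem.Set.add vis node) p.1))).length ≤ n - 1 := by
            rw [← hrest]
            rw [List.length_append] at hlen ⊢
            simp only [List.length_cons] at hlen
            omega
          have hn1 : n - 1 < n := by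
            simp only [List.length_append, List.length_cons] at hlen
            omega
          have hkey : node ∈ (PySem.Dict.ofList matrix).items.map Prod.fst :=
            List.mem_map_of_mem hmem
          have hfun : ∀ child, pvWalk truncate dead child
              ((PySem.Dict.ofList matrix).items.filter
                (fun p => !(PySem.Set.contains (PySem.Set.add vis node) p.1))) =
              pvGenA matrix truncate child (PySem.Set.add vis node) := by
            intro child
            refine ih (n - 1) hn1 (PySem.Set.add vis node) child hlt ?_ ?_
            · intro x hx
              exact (PySem.Set.mem_add vis node x).2 (Or.inl (h1 x hx))
            · intro x hx
              rcases (PySem.Set.mem_add vis node x).1 hx with hxv | rfl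
              · exact h2 x hxv
              · exact Or.inr ⟨hkey, hat⟩
          simp only [hfun, pvStrTake]

theorem pvContains_ofList (l : List String) (x : String) :
    PySem.Set.contains (PySem.Set.ofList l) x = PySem.Set.contains l x := by
  rcases hc : PySem.Set.contains l x with _ | _
  · rcases hc' : PySem.Set.contains (PySem.Set.ofList l) x with _ | _
    · rfl
    · exfalso
      have := (PySem.Set.mem_ofList l x).1 ((PySem.Set.contains_iff _ x).1 hc')
      rw [(PySem.Set.contains_iff l x).2 this] at hc; cases hc
  · rw [(PySem.Set.contains_iff _ x).2 ((PySem.Set.mem_ofList l x).2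
      ((PySem.Set.contains_iff l x).1 hc))]

-- ===== VERDICT (by name: the statement is the Claim_ definition above) =====
theorem gen_paths_spec : Claim_equal_gen_paths := by
  intro matrix root truncate visited _ _
  unfold Spec_gen_paths gen_paths gen_paths_alt
  have hfc : (PySem.Dict.ofList matrix).items.filter
        (fun item => !(PySem.Set.contains (PySem.Set.ofList (visited.getD [])) item.1)) =
      (PySem.Dict.ofList matrix).items.filter
        (fun p => !(PySem.Set.contains (visited.getD []) p.1)) :=
    List.filter_congr (fun p _ => by rw [pvContains_ofList])
  simp only [hfc]
  exact (pvWalk_eq matrix truncate (PySem.Set.ofList (visited.getD [])) _ (visited.getD []) root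
    le_rfl
    (fun x hx => (PySem.Set.mem_ofList _ x).1 hx)
    (fun x hx => Or.inl ((PySem.Set.mem_ofList _ x).2 hx))).symm
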